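-- pv_equiv track=rewrite | github.com/jinxuan-owyong/advent-of-code | 2023/13/solution2.py | solve
-- ===== SOURCE A (Python) =====
-- from typing import List, Tuple
--
-- def isAtMostOneBitDifferent(a: str, b: str):
--     count = 0
--     for x, y in zip(a, b):
--         if x != y:
--             count += 1
--     return count <= 1
--
-- def findPossibleMirror(pattern: List[str]):
--     for i, _ in enumerate(pattern):
--         if i == len(pattern) - 1:
--             break
--         if isAtMostOneBitDifferent(pattern[i], pattern[i + 1]):
--             yield i + 1
--
-- def isValidMirror(pattern: List[str], mirror: int):
--     i = mirror - 1
--     j = mirror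
--     while i >= 0 and j < len(pattern):
--         if not isAtMostOneBitDifferent(pattern[i], pattern[j]):
--             return False
--         i -= 1
--         j += 1
--     return True
--
-- def solve(pattern: List[str], ignore: Tuple, currDirection: str):
--     ignoreDirection, ignoreIdx = ignore
--     for i in findPossibleMirror(pattern):
--         # check for a different reflection line
--         if ignoreDirection == currDirection and i == ignoreIdx:
--             continue
--         if isValidMirror(pattern, i):
--             return i
--     return -1
-- ===== SOURCE B (Python) =====
-- def solve(pattern, ignore, currDirection):
--     ignoreDirection, ignoreIdx = ignore
--     n = len(pattern)
--     near = [[sum(x != y for x, y in zip(a, b)) <= 1 for b in pattern] for a in pattern]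
--     candidates = [i for i in range(1, n)
--                   if not (ignoreDirection == currDirection and i == ignoreIdx)
--                   and all(near[a][b] for a, b in zip(range(i - 1, -1, -1), range(i, n)))]
--     return min(candidates, default=-1)
-- ===== Notes on version B (the rewrite author's own statement) =====
-- stated objective: alternative
-- what changed: B precomputes the full pairwise near-equality matrix in one staged pass, then builds the complete list of valid non-ignored mirror lines (matrix lookups over a zip of a descending and an ascending index range) and returns its minimum with default -1; it trades A's generator pre-filter, two-pointer while-loop and early return for this exhaustive table-and-select formulation, so it is slower on large inputs.
import Mathlib
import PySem

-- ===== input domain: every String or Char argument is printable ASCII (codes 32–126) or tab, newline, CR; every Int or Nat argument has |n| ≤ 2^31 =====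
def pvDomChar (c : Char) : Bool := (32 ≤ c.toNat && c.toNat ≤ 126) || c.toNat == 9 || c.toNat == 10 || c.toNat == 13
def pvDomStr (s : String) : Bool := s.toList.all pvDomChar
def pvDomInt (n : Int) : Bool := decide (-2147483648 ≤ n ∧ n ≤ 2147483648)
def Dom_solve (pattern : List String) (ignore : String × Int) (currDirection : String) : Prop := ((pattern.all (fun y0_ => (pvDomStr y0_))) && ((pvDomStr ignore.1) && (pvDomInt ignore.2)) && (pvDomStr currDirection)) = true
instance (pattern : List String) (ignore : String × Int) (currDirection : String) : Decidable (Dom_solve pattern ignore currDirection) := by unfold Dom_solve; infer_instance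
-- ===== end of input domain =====

-- B precomputes the full pairwise near-equality matrix in one staged pass, then lists
-- ALL valid non-ignored mirror lines (matrix lookups over a zip of a descending and an
-- ascending index range, no early exit) and returns their minimum; slower on large inputs (objective: alternative).

-- ===== PORT A =====
def isAtMostOneBitDifferent (a b : String) : Bool :=
  decide ((a.toList.zip b.toList).foldl (fun c p => if p.1 ≠ p.2 then c + 1 else c) 0 ≤ 1)

def findPossibleMirror (pattern : List String) : List Int :=
  (List.range (pattern.length - 1)).filterMap (fun i =>
    if isAtMostOneBitDifferent (pattern.getD i "") (pattern.getD (i + 1) "") then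
      some ((i : Int) + 1)
    else none)

def isValidAux (pattern : List String) (i j : Int) : Bool :=
  if h : 0 ≤ i ∧ j < (pattern.length : Int) then
    if isAtMostOneBitDifferent (pattern.getD i.toNat "") (pattern.getD j.toNat "") then
      isValidAux pattern (i - 1) (j + 1)
    else false
  else true
termination_by ((pattern.length : Int) - j).toNat
decreasing_by omega

def isValidMirror (pattern : List String) (mirror : Int) : Bool :=
  isValidAux pattern (mirror - 1) mirror

def solveLoop (pattern : List String) (ignoreDirection currDirection : String) (ignoreIdx : Int) : List Int → Int
  | [] => -1
  | i :: rest =>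
    if ignoreDirection == currDirection && i == ignoreIdx then
      solveLoop pattern ignoreDirection currDirection ignoreIdx rest
    else if isValidMirror pattern i then i
    else solveLoop pattern ignoreDirection currDirection ignoreIdx rest

def solve (pattern : List String) (ignore : String × Int) (currDirection : String) : Int :=
  solveLoop pattern ignore.1 currDirection ignore.2 (findPossibleMirror pattern)

-- ===== PORT B =====
-- near = [[sum(x != y for x, y in zip(a, b)) <= 1 for b in pattern] for a in pattern]
def nearTable (pattern : List String) : List (List Bool) :=
  pattern.map (fun a => pattern.map (fun b =>
    decide (((a.toList.zip b.toList).map (fun p => if p.1 ≠ p.2 then (1 : Int) else 0)).sum ≤ 1)))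

def solve_alt (pattern : List String) (ignore : String × Int) (currDirection : String) : Int :=
  let n : Int := pattern.length
  let near := nearTable pattern
  let candidates : List Int := (PySem.List.pyRange 1 n 1).filter (fun i =>
    !(ignore.1 == currDirection && i == ignore.2) &&
    ((PySem.List.pyRange (i - 1) (-1) (-1)).zip (PySem.List.pyRange i n 1)).all
      (fun ab => (near.getD ab.1.toNat []).getD ab.2.toNat false))
  (PySem.List.min? candidates (fun x => x)).getD (-1)

-- ===== PRECONDITION & SPEC =====
def Spec_solve (pattern : List String) (ignore : String × Int) (currDirection : String) (out : Int) : Prop := out = solve_alt pattern ignore currDirection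
instance (pattern : List String) (ignore : String × Int) (currDirection : String) (out : Int) : Decidable (Spec_solve pattern ignore currDirection out) := by unfold Spec_solve; infer_instance

-- ===== CLAIM (what is proved, stated in full; the proofs are below) =====
def Claim_equal_solve : Prop := ∀ (pattern : List String) (ignore : String × Int) (currDirection : String), Dom_solve pattern ignore currDirection → Spec_solve pattern ignore currDirection (solve pattern ignore currDirection)

-- ===== LEMMAS AND PROOFS =====

-- the Int 0/1-sum in B's table and A's foldl counter agree
theorem foldl_count_eq (l : List (Char × Char)) (c : Nat) :
    l.foldl (fun c p => if p.1 ≠ p.2 then c + 1 else c) c = c + l.countP (fun p => p.1 ≠ p.2) := by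
  induction l generalizing c with
  | nil => simp
  | cons p t ih => simp only [List.foldl_cons, List.countP_cons, ih]; split <;> simp_all <;> omega

theorem sum_ite_eq_countP (l : List (Char × Char)) :
    (l.map (fun p => if p.1 ≠ p.2 then (1 : Int) else 0)).sum = l.countP (fun p => p.1 ≠ p.2) := by
  induction l with
  | nil => simp
  | cons p t ih =>
    simp only [List.map_cons, List.sum_cons, List.countP_cons, ih]
    by_cases h : p.1 = p.2 <;> simp [h] <;> push_cast <;> ring

theorem entry_eq (a b : String) :
    decide (((a.toList.zip b.toList).map (fun p => if p.1 ≠ p.2 then (1 : Int) else 0)).sum ≤ 1)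
      = isAtMostOneBitDifferent a b := by
  unfold isAtMostOneBitDifferent
  rw [foldl_count_eq, sum_ite_eq_countP]
  simp only [Nat.zero_add]
  by_cases h : (a.toList.zip b.toList).countP (fun p => p.1 ≠ p.2) ≤ 1
  · rw [decide_eq_true (by exact_mod_cast h), decide_eq_true h]
  · rw [decide_eq_false (by exact_mod_cast h), decide_eq_false h]

theorem all_congr_mem {α : Type} {l : List α} {p q : α → Bool} (h : ∀ a ∈ l, p a = q a) :
    l.all p = l.all q := by
  induction l with
  | nil => rfl
  | cons x t ih =>
    simp only [List.all_cons, h x (by simp), ih (fun a ha => h a (by simp [ha]))]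

-- B's validity test, as a clean Nat-indexed all (proof-side characterisation)
def validAlt (pattern : List String) (i : Nat) : Bool :=
  (List.range (min i (pattern.length - i))).all (fun k =>
    isAtMostOneBitDifferent (pattern.getD (i - 1 - k) "") (pattern.getD (i + k) ""))

theorem zip_range_range (a b : Nat) :
    (List.range a).zip (List.range b) = (List.range (min a b)).map (fun k => (k, k)) := by
  apply List.ext_getElem
  · simp
  · intro k h1 h2
    simp at h1 h2 ⊢

theorem nearTable_getD (pattern : List String) (r c : Nat) (hr : r < pattern.length) (hc : c < pattern.length) :
    ((nearTable pattern).getD r []).getD c false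
      = isAtMostOneBitDifferent (pattern.getD r "") (pattern.getD c "") := by
  unfold nearTable
  simp only [List.getD_eq_getElem?_getD, List.getElem?_map, List.getElem?_eq_getElem hr,
    List.getElem?_eq_getElem hc, Option.map_some, Option.getD_some, entry_eq]

theorem bcheck_eq (pattern : List String) (i : Int) (hi : 1 ≤ i) (hn : i < (pattern.length : Int)) :
    ((PySem.List.pyRange (i - 1) (-1) (-1)).zip (PySem.List.pyRange i (pattern.length : Int) 1)).all
      (fun ab => ((nearTable pattern).getD ab.1.toNat []).getD ab.2.toNat false)
      = validAlt pattern i.toNat := by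
  rw [PySem.List.pyRange_neg_one, PySem.List.pyRange_one, List.zip_map, zip_range_range,
      List.map_map, List.all_map]
  have e2 : min (i - 1 - (-1)).toNat ((pattern.length : Int) - i).toNat
      = min i.toNat (pattern.length - i.toNat) := by omega
  rw [e2]
  unfold validAlt
  apply all_congr_mem
  intro k hk
  simp only [List.mem_range] at hk
  have hk1 : k < i.toNat := by omega
  have hk2 : i.toNat + k < pattern.length := by omega
  have ea : ((i - 1 - (k : Int))).toNat = i.toNat - 1 - k := by omega
  have eb : ((i + (k : Int))).toNat = i.toNat + k := by omega
  simp only [Function.comp, Prod.map_apply]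
  rw [ea, eb]
  have hrow : i.toNat - 1 - k < pattern.length := by omega
  exact nearTable_getD pattern _ _ hrow hk2

-- A's two-pointer validator agrees with the all-based one
theorem validAux_eq (pattern : List String) (i : Nat) (hi : 1 ≤ i) (hn : i < pattern.length) :
    ∀ d k, k + d = min i (pattern.length - i) →
    isValidAux pattern ((i : Int) - 1 - k) ((i : Int) + k) =
      (List.range' k d).all (fun j =>
        isAtMostOneBitDifferent (pattern.getD (i - 1 - j) "") (pattern.getD (i + j) "")) := by
  intro d
  induction d with
  | zero =>
    intro k hk
    rw [isValidAux]
    rw [dif_neg (by omega)]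
    simp
  | succ d ih =>
    intro k hk
    have hk1 : k < i := by omega
    have hk2 : i + k < pattern.length := by omega
    rw [isValidAux]
    rw [dif_pos (by omega)]
    have e1 : ((i : Int) - 1 - k).toNat = i - 1 - k := by omega
    have e2 : ((i : Int) + k).toNat = i + k := by omega
    rw [List.range'_succ, List.all_cons, e1, e2]
    cases hne : isAtMostOneBitDifferent (pattern.getD (i - 1 - k) "") (pattern.getD (i + k) "") with
    | false => simp
    | true =>
      simp only [if_true, Bool.true_and]
      have e3 : (i : Int) - 1 - (k : Int) - 1 = (i : Int) - 1 - ((k + 1 : Nat) : Int) := by push_cast; ring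
      have e4 : (i : Int) + (k : Int) + 1 = (i : Int) + ((k + 1 : Nat) : Int) := by push_cast; ring
      rw [e3, e4, ih (k + 1) (by omega)]

theorem valid_eq (pattern : List String) (i : Nat) (hi : 1 ≤ i) (hn : i < pattern.length) :
    isValidMirror pattern (i : Int) = validAlt pattern i := by
  have h := validAux_eq pattern i hi hn (min i (pattern.length - i)) 0 (by omega)
  simpa [isValidMirror, validAlt, List.range_eq_range'] using h

-- a line whose adjacent pair already mismatches too much is invalid for B too
theorem validAlt_false (pattern : List String) (i : Nat) (hi : 1 ≤ i) (hn : i < pattern.length)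
    (h : isAtMostOneBitDifferent (pattern.getD (i - 1) "") (pattern.getD i "") = false) :
    validAlt pattern i = false := by
  by_contra hcon
  have hall : validAlt pattern i = true := by
    cases hv : validAlt pattern i with
    | false => exact absurd hv hcon
    | true => rfl
  have h0 : (0 : Nat) ∈ List.range (min i (pattern.length - i)) := by
    simp [List.mem_range]; omega
  have := (List.all_eq_true.mp hall) 0 h0
  simp only [Nat.sub_zero, Nat.add_zero, List.getD_eq_getElem?_getD] at this
  simp only [List.getD_eq_getElem?_getD] at h
  rw [this] at h
  cases h

-- A's suffix candidate list in range' form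
def candFrom (pattern : List String) (m : Nat) : List Int :=
  (List.range' m (pattern.length - m)).filterMap (fun j =>
    if isAtMostOneBitDifferent (pattern.getD (j - 1) "") (pattern.getD j "") then some (j : Int) else none)

theorem findPossibleMirror_eq (pattern : List String) :
    findPossibleMirror pattern = candFrom pattern 1 := by
  unfold findPossibleMirror candFrom
  rw [show List.range' 1 (pattern.length - 1) = (List.range (pattern.length - 1)).map (· + 1) by
        rw [List.range'_eq_map_range]; simp [Nat.add_comm]]
  rw [List.filterMap_map]
  apply List.filterMap_congr
  intro i _
  simp

-- B's candidate predicate on a Nat-cast index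
def bPred (pattern : List String) (d c : String) (idx : Int) (i : Nat) : Bool :=
  !(d == c && (i : Int) == idx) && validAlt pattern i

-- A's early-return loop computes the head of the full filtered candidate list
theorem loop_head (pattern : List String) (d c : String) (idx : Int) :
    ∀ f m, 1 ≤ m → pattern.length - m = f →
    solveLoop pattern d c idx (candFrom pattern m) =
      (((List.range' m f).filter (fun i => bPred pattern d c idx i)).map (fun i : Nat => (i : Int))).headD (-1) := by
  intro f
  induction f with
  | zero =>
    intro m hm hf
    unfold candFrom
    rw [show pattern.length - m = 0 by omega]
    simp [solveLoop]
  | succ f ih =>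
    intro m hm hf
    have hlt : m < pattern.length := by omega
    unfold candFrom
    rw [show pattern.length - m = f + 1 by omega, List.range'_succ, List.filterMap_cons,
        List.filter_cons]
    have hrest : (List.range' (m + 1) f).filterMap (fun j =>
        if isAtMostOneBitDifferent (pattern.getD (j - 1) "") (pattern.getD j "") then some (j : Int) else none)
        = candFrom pattern (m + 1) := by
      unfold candFrom; rw [show pattern.length - (m + 1) = f by omega]
    by_cases hadj : isAtMostOneBitDifferent (pattern.getD (m - 1) "") (pattern.getD m "") = true
    · rw [if_pos hadj, hrest, solveLoop]
      by_cases hskip : (d == c && (m : Int) == idx) = true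
      · rw [if_pos hskip, if_neg (by simp [bPred, hskip])]
        exact ih (m + 1) (by omega) (by omega)
      · rw [if_neg hskip, valid_eq pattern m hm hlt]
        by_cases hv : validAlt pattern m = true
        · rw [if_pos hv, if_pos (by simp [bPred, hskip, hv])]
          simp
        · rw [if_neg hv, if_neg (by simp [bPred, hv])]
          exact ih (m + 1) (by omega) (by omega)
    · rw [if_neg hadj, hrest]
      have hv : validAlt pattern m = false :=
        validAlt_false pattern m hm hlt (by simpa using hadj)
      rw [if_neg (by simp [bPred, hv])]
      exact ih (m + 1) (by omega) (by omega)

-- min with default over a strictly increasing list is its head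
theorem foldl_min_of_le (t : List Int) : ∀ x, (∀ y ∈ t, x ≤ y) → t.foldl min x = x := by
  induction t with
  | nil => intro x _; rfl
  | cons a t ih =>
    intro x h
    have hx : min x a = x := min_eq_left (h a (by simp))
    simp only [List.foldl_cons, hx]
    exact ih x (fun y hy => h y (by simp [hy]))

theorem min_getD_head (l : List Int) (h : l.Pairwise (· < ·)) :
    (PySem.List.min? l (fun x => x)).getD (-1) = l.headD (-1) := by
  cases l with
  | nil => simp [PySem.List.min?]
  | cons x t =>
    rw [PySem.List.min?_id_cons]
    have := List.pairwise_cons.mp h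
    rw [foldl_min_of_le t x (fun y hy => le_of_lt (this.1 y hy))]
    rfl

-- ===== VERDICT (by name: the statement is the Claim_ definition above) =====
theorem solve_spec : Claim_equal_solve := by
  intro pattern ignore currDirection _
  unfold Spec_solve solve
  have hfilter : (PySem.List.pyRange 1 (pattern.length : Int) 1).filter (fun i =>
      !(ignore.1 == currDirection && i == ignore.2) &&
      ((PySem.List.pyRange (i - 1) (-1) (-1)).zip (PySem.List.pyRange i (pattern.length : Int) 1)).all
        (fun ab => ((nearTable pattern).getD ab.1.toNat []).getD ab.2.toNat false))
      = ((List.range' 1 (pattern.length - 1)).filter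
          (fun i => bPred pattern ignore.1 currDirection ignore.2 i)).map (fun i : Nat => (i : Int)) := by
    rw [List.filter_congr (fun x hx => by
      rw [bcheck_eq pattern x (PySem.List.mem_pyRange_one.mp hx).1 (PySem.List.mem_pyRange_one.mp hx).2])]
    rw [PySem.List.pyRange_one]
    have hlen : ((pattern.length : Int) - 1).toNat = pattern.length - 1 := by omega
    rw [hlen]
    rw [show (List.range (pattern.length - 1)).map (fun k : Nat => (1 : Int) + (k : Int))
          = (List.range' 1 (pattern.length - 1)).map (fun i : Nat => (i : Int)) by
        rw [List.range'_eq_map_range, List.map_map]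
        apply List.map_congr_left
        intro k _
        simp only [Function.comp_apply]
        push_cast
        ring]
    rw [List.filter_map]
    congr 1
  have hpair : (((List.range' 1 (pattern.length - 1)).filter
      (fun i => bPred pattern ignore.1 currDirection ignore.2 i)).map (fun i : Nat => (i : Int))).Pairwise (· < ·) := by
    refine List.Pairwise.map _ (fun a b h => by exact_mod_cast h) ?_
    exact List.Pairwise.filter _ (List.pairwise_lt_range' 1)
  have hB : solve_alt pattern ignore currDirection
      = (((List.range' 1 (pattern.length - 1)).filter
          (fun i => bPred pattern ignore.1 currDirection ignore.2 i)).map (fun i : Nat => (i : Int))).headD (-1) := by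
    show (PySem.List.min? ((PySem.List.pyRange 1 (pattern.length : Int) 1).filter (fun i =>
        !(ignore.1 == currDirection && i == ignore.2) &&
        ((PySem.List.pyRange (i - 1) (-1) (-1)).zip (PySem.List.pyRange i (pattern.length : Int) 1)).all
          (fun ab => (((nearTable pattern)).getD ab.1.toNat []).getD ab.2.toNat false)))
        (fun x => x)).getD (-1) = _
    rw [hfilter, min_getD_head _ hpair]
  rw [hB, findPossibleMirror_eq,
      loop_head pattern ignore.1 currDirection ignore.2 (pattern.length - 1) 1 le_rfl rfl]
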